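-- pv_equiv track=rewrite | github.com/lizihe1120-gif/Prefix-Reversal-Sort-Algorithm-Implementation | pr_sorter.py | pr_ternary_sort
-- ===== SOURCE A (Python) =====
-- def pr_binary_sort(arr: list[int]) -> list[int]:
--     """
--     Sorts binary sequences using prefix reversals
--
--     Algorithm Overview:
--     1.If last element is 0,reverse entire array to move zeros to beginning
--     2.Scan for transitions between 0 and 1, performing reversals at each transition
--     3.Each reversal at a transition point extends the sorted prefix
--     """
--     #Create working copy
--     a =arr[:]
--     n =len(a)
--     result =[]
--     #Step 1: Handle case where last element is 0
--     if a[-1]==0: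
--         result.append(n-1)
--         reverse_prefix(a,n-1)
--     #Step 2:Scan for transitions between 0 and 1
--     for i in range(n-1):
--         if a[i] !=a[i+1]:
--             result.append(i)
--             reverse_prefix(a,i)
--     if a[-1] !=1:
--         result.append(n-1)
--     return result
--
-- def pr_ternary_sort(arr: list[int]) -> list[int]:
--     """
--     Sorts ternary sequences (containing only 0s, 1s, and 2s) using prefix reversals.
--
--     Algorithm Overview:
--     1. Phase 1: Move all 2 to the end using targeted prefix reversals
--     2. Phase 2: Sort the remaining 0 and 1 using binary sorting strategy
--
--     """
--     # Create working copy
--     a =arr[:]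
--     n =len(a)
--     result =[]
--     #Step 1: Position all 2 at the end of the array
--     for size in range(n, 0,-1):
--         max_i =max((i for i in range(size) if a[i]==2), default = -1)
--         if max_i == -1 or max_i == size-1:
--             continue
--         if max_i !=0:
--             result.append(max_i)
--             reverse_prefix(a, max_i)
--         result.append(size-1)
--         reverse_prefix(a,size-1)
--     #Step 2: Sort the remaning binary sequence
--     remaining_length =n -a.count(2)
--     if remaining_length >1:
--         second_result =[]
--         b =a[:remaining_length]
--         second_result=pr_binary_sort(b)
--         result+=second_result
--     return result
--
-- def reverse_prefix(arr, i):
--     """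
--     Reverse the prefix of array up to index i.
--
--     """
--     arr[0:i+1] =arr[i::-1]
-- ===== SOURCE B (Python) =====
-- def pr_ternary_sort(arr: list[int]) -> list[int]:
--     """
--     Same reversal-index sequence as the original, computed without rescanning:
--     Phase 1 tracks the positions of the 2s under prefix reversals with a single
--     offset (each step shifts ALL remaining 2-positions by the same constant),
--     so the rightmost 2 is found in O(1); Phase 2 emits the binary-phase indices
--     in closed form (the comparisons there only ever read untouched suffix
--     entries, so no reversal needs to be simulated).
--     """
--     n = len(arr)
--     result = []
--     w = list(arr)
--     # descending positions of the 2s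
--     twos = [i for i in range(n - 1, -1, -1) if arr[i] == 2]
--     delta = 0
--     # Phase 1: place each 2 (rightmost first) at the end of the shrinking window
--     for t in twos:
--         L = len(w)
--         p = t + delta
--         if p == L - 1:
--             w.pop()
--         else:
--             if p != 0:
--                 result.append(p)
--             result.append(L - 1)
--             delta += L - 1 - p
--             w = w[p + 1:][::-1] + w[:p]
--     # Phase 2: binary part in closed form
--     if len(w) > 1:
--         if w[-1] == 0:
--             result.append(len(w) - 1)
--             w = w[::-1]
--         for i in range(len(w) - 1):
--             if w[i] != w[i + 1]:
--                 result.append(i)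
--         if w[-1] != 1:
--             result.append(len(w) - 1)
--     return result
-- ===== Notes on version B (the rewrite author's own statement) =====
-- stated objective: faster
-- what changed: Phase 1 no longer rescans the prefix for the rightmost 2 at every window size: since each double reversal shifts all remaining 2-positions by one constant, B keeps the descending list of 2-positions plus a single offset and does O(1) bookkeeping per 2 (slicing only the moved segment); phase 2 emits the binary-phase transition indices in closed form from the window instead of simulating its prefix reversals.
import Mathlib
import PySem

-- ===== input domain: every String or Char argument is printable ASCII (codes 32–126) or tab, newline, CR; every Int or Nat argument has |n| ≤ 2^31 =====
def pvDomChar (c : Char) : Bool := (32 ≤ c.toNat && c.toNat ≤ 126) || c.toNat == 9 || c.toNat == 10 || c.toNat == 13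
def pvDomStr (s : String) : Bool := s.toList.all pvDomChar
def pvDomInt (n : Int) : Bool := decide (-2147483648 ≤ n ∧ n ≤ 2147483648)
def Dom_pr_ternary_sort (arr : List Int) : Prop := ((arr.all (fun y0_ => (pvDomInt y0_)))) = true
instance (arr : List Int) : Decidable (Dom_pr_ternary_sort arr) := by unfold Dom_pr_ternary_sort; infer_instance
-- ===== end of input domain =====

-- B replaces A's per-size rightmost-2 rescan by an offset-tracked 2-position list (one O(1) step per 2)
-- and emits the binary-phase indices in closed form instead of simulating its reversals (objective: faster).

-- ===== PORT A =====
-- a[i]; every call site below indexes in range, where pyGetD is exact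
def pyget (a : List Int) (i : Int) : Int := PySem.List.pyGetD a i 0

-- reverse_prefix: arr[0:i+1] = arr[i::-1]; every call site has 0 <= i < len(arr), where this
-- hand port (first i+1 elements reversed, rest kept) is exact
def revPrefix (a : List Int) (i : Int) : List Int :=
  (a.take (i + 1).toNat).reverse ++ a.drop (i + 1).toNat

-- max((i for i in range(size) if a[i]==2), default=-1)
def maxTwo (a : List Int) (size : Int) : Int :=
  (PySem.List.pyRange 0 size 1).foldl (fun m i => if pyget a i = 2 then max m i else m) (-1)

-- one iteration of pr_binary_sort's scan loop (state: working array, result)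
def binStepA (st : List Int × List Int) (i : Int) : List Int × List Int :=
  if pyget st.1 i ≠ pyget st.1 (i + 1) then (revPrefix st.1 i, st.2 ++ [i]) else st

def pr_binary_sort (arr : List Int) : List Int :=
  let n : Int := PySem.List.len arr
  let st := if pyget arr (-1) = 0 then (revPrefix arr (n - 1), [n - 1]) else (arr, ([] : List Int))
  let st := (PySem.List.pyRange 0 (n - 1) 1).foldl binStepA st
  if pyget st.1 (-1) ≠ 1 then st.2 ++ [n - 1] else st.2

-- one iteration of pr_ternary_sort's phase-1 loop (state: working array, result)
def terStepA (st : List Int × List Int) (size : Int) : List Int × List Int :=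
  let max_i := maxTwo st.1 size
  if max_i = -1 ∨ max_i = size - 1 then st
  else
    let st1 := if max_i ≠ 0 then (revPrefix st.1 max_i, st.2 ++ [max_i]) else st
    (revPrefix st1.1 (size - 1), st1.2 ++ [size - 1])

def pr_ternary_sort (arr : List Int) : List Int :=
  let n : Int := PySem.List.len arr
  let st := (PySem.List.pyRange n 0 (-1)).foldl terStepA (arr, [])
  let remaining : Int := n - PySem.List.count st.1 2
  if remaining > 1 then st.2 ++ pr_binary_sort (PySem.List.slice st.1 none (some remaining))
  else st.2

-- ===== PORT B =====
-- one iteration of Source B's phase-1 loop (state: window w, offset delta, result);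
-- w.pop() (discard the last element; w is nonempty at the call) is ported as dropLast,
-- w[p+1:][::-1] as (slice ...).reverse (s[::-1] is reverse: PySem.List.slice?_none_none_neg_one)
def phase1Step (st : List Int × Int × List Int) (t : Int) : List Int × Int × List Int :=
  let w := st.1
  let delta := st.2.1
  let res := st.2.2
  let L : Int := PySem.List.len w
  let p := t + delta
  if p = L - 1 then (w.dropLast, delta, res)
  else
    let res := if p ≠ 0 then res ++ [p] else res
    ((PySem.List.slice w (some (p + 1)) none).reverse ++ PySem.List.slice w none (some p),
      delta + (L - 1 - p), res ++ [L - 1])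

def pr_ternary_sort_alt (arr : List Int) : List Int :=
  let n : Int := PySem.List.len arr
  let twos := (PySem.List.pyRange (n - 1) (-1) (-1)).filter (fun i => pyget arr i = 2)
  let st := twos.foldl phase1Step (arr, 0, [])
  let w := st.1
  let res := st.2.2
  let m : Int := PySem.List.len w
  if m > 1 then
    let wr := if pyget w (-1) = 0 then (w.reverse, res ++ [m - 1]) else (w, res)
    let res := (PySem.List.pyRange 0 (m - 1) 1).foldl
      (fun r i => if pyget wr.1 i ≠ pyget wr.1 (i + 1) then r ++ [i] else r) wr.2
    if pyget wr.1 (-1) ≠ 1 then res ++ [m - 1] else res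
  else res

-- ===== PRECONDITION & SPEC =====
def Spec_pr_ternary_sort (arr : List Int) (out : List Int) : Prop := out = pr_ternary_sort_alt arr
instance (arr : List Int) (out : List Int) : Decidable (Spec_pr_ternary_sort arr out) := by unfold Spec_pr_ternary_sort; infer_instance

-- ===== CLAIM (what is proved, stated in full; the proofs are below) =====
def Claim_equal_pr_ternary_sort : Prop := ∀ (arr : List Int), Dom_pr_ternary_sort arr → Spec_pr_ternary_sort arr (pr_ternary_sort arr)

-- ===== LEMMAS AND PROOFS =====

-- descending list of the positions holding a 2 (what Source B's `twos` denotes for the initial array)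
def twoPos (w : List Int) : List Int :=
  (PySem.List.pyRange ((w.length : Int) - 1) (-1) (-1)).filter (fun i => pyget w i = 2)

lemma pyget_append_lt {w z : List Int} {i : Int} (h0 : 0 ≤ i) (h : i < (w.length : Int)) :
    pyget (w ++ z) i = pyget w i := by
  rw [pyget, pyget, PySem.List.pyGetD_eq_getElem _ _ h0 h,
    PySem.List.pyGetD_eq_getElem _ _ h0 (by simp; omega)]
  exact List.getElem_append_left (by omega)

lemma mem_twoPos {w : List Int} {j : Int} :
    j ∈ twoPos w ↔ (0 ≤ j ∧ j < (w.length : Int) ∧ pyget w j = 2) := by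
  simp [twoPos, List.mem_filter, PySem.List.mem_pyRange_neg_one]
  omega

lemma twoPos_snoc (u : List Int) (x : Int) :
    twoPos (u ++ [x]) = (if x = 2 then [(u.length : Int)] else []) ++ twoPos u := by
  have hlen : (((u ++ [x]).length : Int) - 1) = (u.length : Int) := by simp
  have hx : pyget (u ++ [x]) (u.length : Int) = x := by
    rw [pyget, PySem.List.pyGetD_eq_getElem _ _ (by positivity) (by simp)]
    simp
  rw [twoPos, hlen, PySem.List.pyRange_neg_one_cons (by omega), List.filter_cons]
  have htail : (PySem.List.pyRange ((u.length : Int) - 1) (-1) (-1)).filter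
      (fun i => pyget (u ++ [x]) i = 2) = twoPos u := by
    rw [twoPos]
    exact List.filter_congr (fun j hj => by
      have := (PySem.List.mem_pyRange_neg_one).1 hj
      simp only [decide_eq_decide]
      rw [pyget_append_lt (by omega) (by omega)])
  rw [htail, hx]
  by_cases h : x = 2 <;> simp [h]

lemma twoPos_nil : twoPos [] = [] := by decide

lemma twoPos_append (u v : List Int) :
    twoPos (u ++ v) = (twoPos v).map (· + (u.length : Int)) ++ twoPos u := by
  induction v using List.reverseRecOn with
  | nil => simp [twoPos_nil]
  | append_singleton v x ih =>
    rw [← List.append_assoc, twoPos_snoc, twoPos_snoc, ih, List.map_append]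
    by_cases h : x = 2 <;> simp [h] <;> ring_nf

lemma twoPos_eq_nil_iff {u : List Int} : twoPos u = [] ↔ (2 : Int) ∉ u := by
  rw [List.eq_nil_iff_forall_not_mem]
  constructor
  · intro h hmem
    obtain ⟨j, hj, hje⟩ := List.mem_iff_getElem.1 hmem
    refine h (j : Int) (mem_twoPos.2 ⟨by positivity, by exact_mod_cast hj, ?_⟩)
    rw [pyget, PySem.List.pyGetD_eq_getElem _ _ (by positivity) (by exact_mod_cast hj)]
    simpa using hje
  · intro h j hjm
    obtain ⟨h0, hlt, he⟩ := mem_twoPos.1 hjm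
    rw [pyget, PySem.List.pyGetD_eq_getElem _ _ h0 hlt] at he
    exact h (he ▸ List.getElem_mem _)

lemma maxTwo_append {w z : List Int} {s : Int} (hs : s ≤ (w.length : Int)) :
    maxTwo (w ++ z) s = maxTwo w s := by
  refine PySem.List.foldl_congr_mem _ _ _ _ (fun acc x hx => ?_)
  have := (PySem.List.mem_pyRange_one).1 hx
  rw [pyget_append_lt (by omega) (by omega)]

lemma headD_twoPosUpto_lt (w : List Int) (s : Int) (hs : 0 ≤ s) :
    ((PySem.List.pyRange (s - 1) (-1) (-1)).filter (fun i => pyget w i = 2)).headD (-1) < s := by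
  cases he : (PySem.List.pyRange (s - 1) (-1) (-1)).filter (fun i => pyget w i = 2) with
  | nil => simpa using by omega
  | cons x xs =>
    have hx : x ∈ (PySem.List.pyRange (s - 1) (-1) (-1)).filter (fun i => pyget w i = 2) := by
      rw [he]; exact List.mem_cons_self
    have := (PySem.List.mem_pyRange_neg_one).1 (List.mem_of_mem_filter hx)
    simpa using by omega

lemma maxTwo_eq_headD (w : List Int) (s : Nat) :
    maxTwo w (s : Int) = ((PySem.List.pyRange ((s : Int) - 1) (-1) (-1)).filter
      (fun i => pyget w i = 2)).headD (-1) := by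
  induction s with
  | zero =>
    simp [maxTwo, PySem.List.pyRange_one_eq_nil (le_refl (0:Int))]
  | succ k ih =>
    have h1 : ((k : Int) + 1) = ((k + 1 : Nat) : Int) := by push_cast; ring
    rw [maxTwo, show ((k + 1 : Nat) : Int) = (k : Int) + 1 by push_cast; ring,
      PySem.List.pyRange_one_succ_right (by positivity), List.foldl_append]
    rw [show (k : Int) + 1 - 1 = (k : Int) by ring, PySem.List.pyRange_neg_one_cons (by omega),
      List.filter_cons]
    rw [← maxTwo, ih]
    simp only [List.foldl_cons, List.foldl_nil]
    by_cases h : pyget w (k : Int) = 2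
    · have hlt := headD_twoPosUpto_lt w (k : Int) (by positivity)
      rw [← ih] at hlt
      rw [← ih]
      simp only [h, decide_true, if_true, List.headD_cons]
      rw [ih, max_eq_right (by omega)]
    · simp [h]

lemma maxTwo_spec (w : List Int) : maxTwo w (w.length : Int) = (twoPos w).headD (-1) := by
  rw [maxTwo_eq_headD w w.length, twoPos]

lemma length_revPrefix (a : List Int) (i : Int) : (revPrefix a i).length = a.length := by
  simp [revPrefix]; omega

lemma revPrefix_zero (a : List Int) : revPrefix a 0 = a := by
  cases a <;> simp [revPrefix]

lemma revPrefix_all (a : List Int) : revPrefix a ((a.length : Int) - 1) = a.reverse := by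
  cases a with
  | nil => simp [revPrefix]
  | cons x xs =>
    rw [revPrefix, show ((x :: xs).length : Int) - 1 + 1 = ((x :: xs).length : Int) by ring]
    simp

lemma pyget_revPrefix_gt {a : List Int} {i j : Int} (h0 : 0 ≤ i) (hij : i < j) :
    pyget (revPrefix a i) j = pyget a j := by
  have hj0 : 0 ≤ j := by omega
  rw [pyget, pyget, PySem.List.pyGetD_of_nonneg _ _ hj0, PySem.List.pyGetD_of_nonneg _ _ hj0,
    List.getD_eq_getElem?_getD, List.getD_eq_getElem?_getD]
  by_cases hle : (i + 1).toNat ≤ a.length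
  · rw [revPrefix]
    rw [List.getElem?_append_right (by simp; omega)]
    rw [List.getElem?_drop]
    have hidx : (i + 1).toNat + (j.toNat - ((a.take (i + 1).toNat).reverse).length) = j.toNat := by
      simp only [List.length_reverse, List.length_take]
      omega
    rw [hidx]
  · have : (revPrefix a i).length = a.length := length_revPrefix a i
    rw [List.getElem?_eq_none (by omega), List.getElem?_eq_none (by omega)]

lemma pyget_neg_one_eq (x : List Int) : pyget x (-1) = x.getLast?.getD 0 := by
  rw [pyget, show PySem.List.pyGetD x (-1) 0 = (PySem.List.pyGet? x (-1)).getD 0 from rfl,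
    PySem.List.pyGet?_neg_one]

lemma pyget_revPrefix_neg_one {a : List Int} {i : Int} (h0 : 0 ≤ i)
    (h : i + 1 < (a.length : Int)) : pyget (revPrefix a i) (-1) = pyget a (-1) := by
  have hdne : a.drop (i + 1).toNat ≠ [] := by
    intro h'
    have := congrArg List.length h'
    simp at this
    omega
  rw [pyget_neg_one_eq, pyget_neg_one_eq, revPrefix, List.getLast?_append_of_ne_nil _ hdne]
  conv_rhs => rw [← List.take_append_drop (i + 1).toNat a, List.getLast?_append_of_ne_nil _ hdne]

lemma bin_loop (b : List Int) (k : Nat) : ∀ (i : Int) (a res : List Int),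
    0 ≤ i →
    a.length = b.length →
    ((b.length : Int) - 1) - i = (k : Int) →
    (∀ j : Int, i ≤ j → pyget a j = pyget b j) →
    pyget a (-1) = pyget b (-1) →
    ((PySem.List.pyRange i ((b.length : Int) - 1) 1).foldl binStepA (a, res)).2 =
        res ++ (PySem.List.pyRange i ((b.length : Int) - 1) 1).filter
          (fun j => decide (pyget b j ≠ pyget b (j + 1))) ∧
    pyget ((PySem.List.pyRange i ((b.length : Int) - 1) 1).foldl binStepA (a, res)).1 (-1)
      = pyget b (-1) := by
  induction k with
  | zero =>
    intro i a res h0 hlen hk hinv hneg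
    rw [PySem.List.pyRange_one_eq_nil (by omega)]
    constructor
    · simp
    · simpa using hneg
  | succ k ih =>
    intro i a res h0 hlen hk hinv hneg
    rw [PySem.List.pyRange_one_cons (by omega), List.filter_cons, List.foldl_cons]
    have hci : pyget a i = pyget b i := hinv i le_rfl
    have hci1 : pyget a (i + 1) = pyget b (i + 1) := hinv (i + 1) (by omega)
    by_cases hc : pyget b i ≠ pyget b (i + 1)
    · have hstep : binStepA (a, res) i = (revPrefix a i, res ++ [i]) := by
        rw [binStepA]
        simp only [hci, hci1]
        rw [if_pos hc]
      rw [hstep]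
      have hIH := ih (i + 1) (revPrefix a i) (res ++ [i]) (by omega)
        (by rw [length_revPrefix]; exact hlen) (by omega)
        (fun j hj => by rw [pyget_revPrefix_gt h0 (by omega)]; exact hinv j (by omega))
        (by rw [pyget_revPrefix_neg_one h0 (by rw [hlen]; omega)]; exact hneg)
      refine ⟨?_, hIH.2⟩
      rw [hIH.1]
      simp [hc]
    · have hstep : binStepA (a, res) i = (a, res) := by
        rw [binStepA]
        simp only [hci, hci1]
        rw [if_neg hc]
      rw [hstep]
      have hIH := ih (i + 1) a res (by omega) hlen (by omega)
        (fun j hj => hinv j (by omega)) hneg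
      refine ⟨?_, hIH.2⟩
      rw [hIH.1]
      simp [hc]

lemma binary_closed (b : List Int) (hb : 2 ≤ b.length) :
    pr_binary_sort b =
      (let n : Int := b.length
       let wr := if pyget b (-1) = 0 then (b.reverse, [n - 1]) else (b, ([] : List Int))
       let res := wr.2 ++ (PySem.List.pyRange 0 (n - 1) 1).filter
          (fun j => decide (pyget wr.1 j ≠ pyget wr.1 (j + 1)))
       if pyget wr.1 (-1) ≠ 1 then res ++ [n - 1] else res) := by
  rw [pr_binary_sort]
  simp only [PySem.List.len_eq, revPrefix_all]
  by_cases h0 : pyget b (-1) = 0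
  · simp only [if_pos h0]
    obtain ⟨h1, h2⟩ := bin_loop b.reverse (b.length - 1) 0 b.reverse [(b.length : Int) - 1]
      le_rfl rfl (by simp; omega) (fun j _ => rfl) rfl
    simp only [List.length_reverse] at h1 h2
    rw [h1, h2]
  · simp only [if_neg h0]
    obtain ⟨h1, h2⟩ := bin_loop b (b.length - 1) 0 b []
      le_rfl rfl (by simp; omega) (fun j _ => rfl) rfl
    rw [h1, h2]

lemma pyget_out_of_range {w : List Int} {j : Int} (h0 : 0 ≤ j) (h : (w.length : Int) ≤ j) :
    pyget w j = 0 := by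
  rw [pyget, PySem.List.pyGetD_of_nonneg _ _ h0, List.getD_eq_default _ _ (by omega)]

lemma filter_two_nil {w : List Int} (hw : (2 : Int) ∉ w) (t : Int) :
    (PySem.List.pyRange t (-1) (-1)).filter (fun i => pyget w i = 2) = [] := by
  rw [List.filter_eq_nil_iff]
  intro j hj
  have hb := (PySem.List.mem_pyRange_neg_one).1 hj
  simp only [decide_eq_true_eq]
  intro he
  by_cases hl : j < (w.length : Int)
  · rw [pyget, PySem.List.pyGetD_eq_getElem _ _ (by omega) hl] at he
    exact hw (he ▸ List.getElem_mem _)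
  · rw [pyget_out_of_range (by omega) (by omega)] at he
    norm_num at he

lemma noTwos_fold (w : List Int) (hw : twoPos w = []) (m : Nat) (res : List Int) :
    ∀ s : Nat, s ≤ w.length →
    (PySem.List.pyRange (s : Int) 0 (-1)).foldl terStepA (w ++ List.replicate m 2, res) =
      (w ++ List.replicate m 2, res) := by
  have hnm : (2 : Int) ∉ w := twoPos_eq_nil_iff.1 hw
  intro s
  induction s with
  | zero =>
    intro _
    rw [PySem.List.pyRange_neg_one_eq_nil (by omega)]
    rfl
  | succ k ih =>
    intro hk
    have hc : ((k + 1 : Nat) : Int) = (k : Int) + 1 := by push_cast; ring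
    rw [hc, PySem.List.pyRange_neg_one_cons (by omega : (0:Int) < (k : Int) + 1), List.foldl_cons]
    have hmax : maxTwo (w ++ List.replicate m 2) ((k : Int) + 1) = -1 := by
      rw [← hc, maxTwo_append (by exact_mod_cast hk), maxTwo_eq_headD w (k + 1),
        filter_two_nil hnm]
      rfl
    have hstep : terStepA (w ++ List.replicate m 2, res) ((k : Int) + 1) =
        (w ++ List.replicate m 2, res) := by
      rw [terStepA]
      simp [hmax]
    rw [hstep, show (k : Int) + 1 - 1 = (k : Int) by ring]
    exact ih (by omega)

lemma revPrefix_append (u z : List Int) (i : Int) (h : (i + 1).toNat ≤ u.length) :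
    revPrefix (u ++ z) i = revPrefix u i ++ z := by
  rw [revPrefix, revPrefix, List.take_append_of_le_length h,
    List.drop_append_of_le_length h, List.append_assoc]

lemma stepA_state (w : List Int) (m : Nat) (p : Int) (hp0 : 0 ≤ p) (hpl : p < (w.length : Int))
    (hpg : pyget w p = 2) :
    revPrefix (revPrefix (w ++ List.replicate m 2) p) ((w.length : Int) - 1) =
      ((w.drop (p + 1).toNat).reverse ++ w.take p.toNat) ++ List.replicate (m + 1) 2 := by
  have hle : (p + 1).toNat ≤ w.length := by omega
  have hlen2 : (revPrefix w p).length = w.length := length_revPrefix w p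
  rw [revPrefix_append w _ p hle,
    revPrefix_append (revPrefix w p) _ ((w.length : Int) - 1) (by rw [hlen2]; omega), show ((w.length : Int) - 1) = ((revPrefix w p).length : Int) - 1 by rw [hlen2],
    revPrefix_all, revPrefix, List.reverse_append, List.reverse_reverse]
  have htk : w.take (p + 1).toNat = w.take p.toNat ++ [(2 : Int)] := by
    have : (p + 1).toNat = p.toNat + 1 := by omega
    rw [this, List.take_succ]
    congr 1
    rw [pyget, PySem.List.pyGetD_eq_getElem _ _ hp0 hpl] at hpg
    rw [List.getElem?_eq_getElem (by omega), hpg]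
    rfl
  rw [htk]
  simp only [List.append_assoc, List.replicate_succ]
  rfl

lemma twoPos_single : twoPos [(2 : Int)] = [0] := by decide

lemma twoPos_step {w : List Int} {p : Int} {tl : List Int}
    (hp0 : 0 ≤ p) (hpl : p < (w.length : Int)) (hmap : twoPos w = p :: tl) :
    twoPos ((w.drop (p + 1).toNat).reverse ++ w.take p.toNat) =
      tl.map (· + ((w.length : Int) - 1 - p)) := by
  have hpg : pyget w p = 2 := (mem_twoPos.1 (hmap ▸ List.mem_cons_self)).2.2
  have hget : w[p.toNat] = 2 := by
    rw [pyget, PySem.List.pyGetD_eq_getElem _ _ hp0 hpl] at hpg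
    exact hpg
  have hsucc : (p + 1).toNat = p.toNat + 1 := by omega
  have hdrop : w.drop p.toNat = [(2 : Int)] ++ w.drop (p + 1).toNat := by
    rw [hsucc, ← hget]
    exact List.drop_eq_getElem_cons (by omega)
  have hdec : twoPos w = ((twoPos (w.drop p.toNat)).map (· + ((w.take p.toNat).length : Int)))
      ++ twoPos (w.take p.toNat) := by
    conv_lhs => rw [← List.take_append_drop p.toNat w]
    exact twoPos_append _ _
  have htklen : ((w.take p.toNat).length : Int) = p := by simp; omega
  rw [hdrop, twoPos_append, twoPos_single] at hdec
  set u := twoPos (w.drop (p + 1).toNat) with hu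
  have hunil : u = [] := by
    cases hcu : u with
    | nil => rfl
    | cons c cs =>
      have hc : c ∈ u := by rw [hcu]; exact List.mem_cons_self
      have hc0 : 0 ≤ c := (mem_twoPos.1 (hu ▸ hc)).1
      rw [hcu] at hdec
      rw [hmap] at hdec
      simp at hdec
      omega
  rw [hunil] at hdec
  simp only [List.map_nil, List.nil_append, List.map_cons] at hdec
  rw [hmap, htklen] at hdec
  simp at hdec
  -- hdec : tl = twoPos (take)
  rw [twoPos_append]
  have hrevnil : twoPos ((w.drop (p + 1).toNat).reverse) = [] := by
    rw [twoPos_eq_nil_iff, List.mem_reverse, ← twoPos_eq_nil_iff, ← hu, hunil]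
  have hrevlen : (((w.drop (p + 1).toNat).reverse).length : Int) = (w.length : Int) - 1 - p := by
    simp; omega
  rw [hrevnil, hrevlen]
  rw [hdec]
  simp

lemma phase1_sim : ∀ (twos : List Int) (w res : List Int) (delta : Int) (m : Nat),
    twos.map (· + delta) = twoPos w →
    (PySem.List.pyRange (w.length : Int) 0 (-1)).foldl terStepA (w ++ List.replicate m 2, res) =
      ((twos.foldl phase1Step (w, delta, res)).1 ++ List.replicate (m + twos.length) 2,
       (twos.foldl phase1Step (w, delta, res)).2.2) ∧
    (twos.foldl phase1Step (w, delta, res)).1.length + twos.length = w.length ∧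
    twoPos (twos.foldl phase1Step (w, delta, res)).1 = [] := by
  intro twos
  induction twos with
  | nil =>
    intro w res delta m hmap
    have hw : twoPos w = [] := by simpa using hmap.symm
    refine ⟨?_, by simp, by simpa using hw⟩
    simpa using noTwos_fold w hw m res w.length le_rfl
  | cons t rest ih =>
    intro w res delta m hmap
    have hmap' : twoPos w = (t + delta) :: rest.map (· + delta) := by
      rw [← hmap]; simp
    set p := t + delta with hp
    obtain ⟨hp0, hpl, hpg⟩ := mem_twoPos.1 (hmap' ▸ List.mem_cons_self)
    rw [PySem.List.pyRange_neg_one_cons (by omega : (0 : Int) < (w.length : Int)),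
      List.foldl_cons, List.foldl_cons]
    have hmax : maxTwo (w ++ List.replicate m 2) (w.length : Int) = p := by
      rw [maxTwo_append le_rfl, maxTwo_spec, hmap']
      rfl
    by_cases hpe : p = (w.length : Int) - 1
    · -- rightmost 2 already at the end of the window: A skips, B pops
      have hAstep : terStepA (w ++ List.replicate m 2, res) (w.length : Int) =
          (w ++ List.replicate m 2, res) := by
        rw [terStepA]
        simp only [hmax]
        rw [if_pos (Or.inr hpe)]
      have hBstep : phase1Step (w, delta, res) t = (w.dropLast, delta, res) := by
        rw [phase1Step]
        simp only [PySem.List.len_eq, ← hp]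
        rw [if_pos hpe]
      have hne : w ≠ [] := by intro h; subst h; simp at hpl; omega
      have hlast : w.getLast hne = 2 := by
        rw [List.getLast_eq_getElem]
        rw [pyget, PySem.List.pyGetD_eq_getElem _ _ hp0 hpl] at hpg
        have hcg : w[w.length - 1] = w[p.toNat] := by congr 1; omega
        rw [hcg]
        exact hpg
      have hwdec : w = w.dropLast ++ [(2 : Int)] := by
        rw [← hlast]
        exact (List.dropLast_append_getLast hne).symm
      have hdl : (w.dropLast).length = w.length - 1 := by simp
      have hdlc : ((w.dropLast).length : Int) = (w.length : Int) - 1 := by rw [hdl]; omega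
      have hmap2 : rest.map (· + delta) = twoPos w.dropLast := by
        have hs := twoPos_snoc w.dropLast 2
        rw [← hwdec, if_pos rfl, hdlc, ← hpe, hmap'] at hs
        simpa using hs
      have harr : w ++ List.replicate m 2 = w.dropLast ++ List.replicate (m + 1) 2 := by
        conv_lhs => rw [hwdec]
        rw [List.append_assoc, List.replicate_succ]
        rfl
      rw [hAstep, hBstep, harr]
      have hIH := ih w.dropLast res delta (m + 1) hmap2
      rw [hdlc] at hIH
      refine ⟨?_, by have := hIH.2.1; simp only [List.length_cons]; omega, hIH.2.2⟩
      rw [hIH.1]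
      have hc : m + 1 + rest.length = m + (t :: rest).length := by simp; omega
      rw [hc]
    · -- bring rightmost 2 to the front, then to the end of the window
      have hplt : p < (w.length : Int) - 1 := by omega
      have hw'' : revPrefix (revPrefix (w ++ List.replicate m 2) p) ((w.length : Int) - 1) =
          ((w.drop (p + 1).toNat).reverse ++ w.take p.toNat) ++ List.replicate (m + 1) 2 :=
        stepA_state w m p hp0 hpl hpg
      have hAstep : terStepA (w ++ List.replicate m 2, res) (w.length : Int) =
          (((w.drop (p + 1).toNat).reverse ++ w.take p.toNat) ++ List.replicate (m + 1) 2,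
           (if p ≠ 0 then res ++ [p] else res) ++ [(w.length : Int) - 1]) := by
        rw [terStepA]
        simp only [hmax]
        rw [if_neg (by push_neg; exact ⟨by omega, hpe⟩)]
        by_cases hz : p ≠ 0
        · simp only [if_pos hz, hw'']
        · push_neg at hz
          rw [if_neg (show ¬ p ≠ 0 by simp [hz])]
          dsimp only
          rw [show revPrefix (w ++ List.replicate m 2) ((w.length : Int) - 1) =
            revPrefix (revPrefix (w ++ List.replicate m 2) p) ((w.length : Int) - 1) by
              rw [hz, revPrefix_zero], hw'']
          simp [hz]
      have hBstep : phase1Step (w, delta, res) t =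
          (((w.drop (p + 1).toNat).reverse ++ w.take p.toNat),
           delta + ((w.length : Int) - 1 - p),
           (if p ≠ 0 then res ++ [p] else res) ++ [(w.length : Int) - 1]) := by
        rw [phase1Step]
        simp only [PySem.List.len_eq, ← hp]
        rw [if_neg hpe, PySem.List.slice_from _ (by omega : (0:Int) ≤ p + 1),
          PySem.List.slice_to _ hp0]
      have h2p := twoPos_step hp0 hpl hmap'
      have hmap2 : rest.map (· + (delta + ((w.length : Int) - 1 - p))) =
          twoPos ((w.drop (p + 1).toNat).reverse ++ w.take p.toNat) := by
        rw [h2p, List.map_map]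
        exact (List.map_congr_left (fun x _ => by simp; ring)).symm
      have hw''len : (((w.drop (p + 1).toNat).reverse ++ w.take p.toNat).length : Int) =
          (w.length : Int) - 1 := by
        simp
        omega
      rw [hAstep, hBstep]
      have hIH := ih ((w.drop (p + 1).toNat).reverse ++ w.take p.toNat)
        ((if p ≠ 0 then res ++ [p] else res) ++ [(w.length : Int) - 1])
        (delta + ((w.length : Int) - 1 - p)) (m + 1) hmap2
      rw [hw''len] at hIH
      refine ⟨?_, by have := hIH.2.1; simp only [List.length_cons] at *; simp at this ⊢; omega,
        hIH.2.2⟩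
      rw [hIH.1]
      have hc : m + 1 + rest.length = m + (t :: rest).length := by simp; omega
      rw [hc]

lemma a_eq_b : ∀ arr : List Int, pr_ternary_sort arr = pr_ternary_sort_alt arr := by
  intro arr
  rw [pr_ternary_sort, pr_ternary_sort_alt]
  simp only [PySem.List.len_eq]
  have htwos : (PySem.List.pyRange ((arr.length : Int) - 1) (-1) (-1)).filter
      (fun i => pyget arr i = 2) = twoPos arr := rfl
  rw [htwos]
  obtain ⟨h1, h2, h3⟩ := phase1_sim (twoPos arr) arr [] 0 0 (by simp)
  simp only [List.replicate_zero, List.append_nil, Nat.zero_add] at h1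
  set st := (twoPos arr).foldl phase1Step (arr, 0, ([] : List Int)) with hst
  set wf := st.1 with hwf
  set K := (twoPos arr).length with hK
  rw [h1]
  have hcount : PySem.List.count (wf ++ List.replicate K 2) 2 = (K : Int) := by
    rw [PySem.List.count_eq, List.count_append, List.count_replicate]
    have : List.count 2 wf = 0 := List.count_eq_zero.2 (twoPos_eq_nil_iff.1 h3)
    simp [this]
  rw [hcount]
  have hrem : (arr.length : Int) - (K : Int) = (wf.length : Int) := by omega
  rw [hrem]
  have hslice : PySem.List.slice (wf ++ List.replicate K 2) none (some (wf.length : Int)) = wf := by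
    rw [PySem.List.slice_to _ (by positivity)]
    simp
  rw [hslice]
  by_cases hlen : (1 : Int) < (wf.length : Int)
  · rw [if_pos hlen, if_pos hlen, binary_closed wf (by exact_mod_cast hlen)]
    by_cases h0 : pyget wf (-1) = 0
    · simp only [if_pos h0]
      rw [PySem.List.foldl_append_ite_eq_filter]
      by_cases h1' : pyget wf.reverse (-1) ≠ 1 <;> simp [h1', List.append_assoc]
    · simp only [if_neg h0]
      rw [PySem.List.foldl_append_ite_eq_filter]
      by_cases h1' : pyget wf (-1) ≠ 1 <;> simp [h1', List.append_assoc]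
  · rw [if_neg hlen, if_neg hlen]

-- ===== VERDICT (by name: the statement is the Claim_ definition above) =====
theorem pr_ternary_sort_spec : Claim_equal_pr_ternary_sort := by
  intro arr _
  unfold Spec_pr_ternary_sort
  exact a_eq_b arr
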